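-- pv_equiv track=rewrite | github.com/CHOUME-701/removable-sets-check | C_set0.py | set_ne
-- ===== SOURCE A (Python) =====
-- def reverse_graph(graph):
--     reversed_graph = {node: {} for node in graph}
--     for node, neighbors in graph.items():
--         for neighbor in neighbors:
--             if neighbor not in reversed_graph:
--                 reversed_graph[neighbor] = {}
--             reversed_graph[neighbor][node] = graph[node][neighbor]
--     return reversed_graph
--
-- def ne(DAG, node, reverse_DAG=None):
--     if reverse_DAG is None:
--         reverse_DAG = reverse_graph(DAG)
--     ne_ = set(DAG[node].keys()) | set(reverse_DAG[node].keys())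
--     return ne_
--
-- def set_ne(DAG, nodes, reverse_DAG=None):
--     stack = list(nodes)
--     if reverse_DAG is None:
--         reverse_DAG = reverse_graph(DAG)
--     set_ne_ = set()
--     for i in stack:
--         set_ne_ = set_ne_ | ne(DAG, i, reverse_DAG)
--     return set_ne_
-- ===== SOURCE B (Python) =====
-- def set_ne(DAG, nodes, reverse_DAG=None):
--     result = set()
--     if reverse_DAG is None:
--         # no reverse graph is built: in-neighbors of i are found by scanning DAG directly
--         for i in nodes:
--             result.update(DAG[i].keys())
--             for u, nbrs in DAG.items():
--                 if i in nbrs: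
--                     result.add(u)
--     else:
--         for i in nodes:
--             result.update(DAG[i].keys())
--             result.update(reverse_DAG[i].keys())
--     return result
-- ===== Notes on version B (the rewrite author's own statement) =====
-- stated objective: alternative
-- what changed: In the default branch B never builds the reverse-graph index: it finds the in-neighbors of each requested node by scanning DAG's adjacency lists directly, and both branches grow one result set in place instead of allocating and uniting per-node neighbor sets.
import Mathlib
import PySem

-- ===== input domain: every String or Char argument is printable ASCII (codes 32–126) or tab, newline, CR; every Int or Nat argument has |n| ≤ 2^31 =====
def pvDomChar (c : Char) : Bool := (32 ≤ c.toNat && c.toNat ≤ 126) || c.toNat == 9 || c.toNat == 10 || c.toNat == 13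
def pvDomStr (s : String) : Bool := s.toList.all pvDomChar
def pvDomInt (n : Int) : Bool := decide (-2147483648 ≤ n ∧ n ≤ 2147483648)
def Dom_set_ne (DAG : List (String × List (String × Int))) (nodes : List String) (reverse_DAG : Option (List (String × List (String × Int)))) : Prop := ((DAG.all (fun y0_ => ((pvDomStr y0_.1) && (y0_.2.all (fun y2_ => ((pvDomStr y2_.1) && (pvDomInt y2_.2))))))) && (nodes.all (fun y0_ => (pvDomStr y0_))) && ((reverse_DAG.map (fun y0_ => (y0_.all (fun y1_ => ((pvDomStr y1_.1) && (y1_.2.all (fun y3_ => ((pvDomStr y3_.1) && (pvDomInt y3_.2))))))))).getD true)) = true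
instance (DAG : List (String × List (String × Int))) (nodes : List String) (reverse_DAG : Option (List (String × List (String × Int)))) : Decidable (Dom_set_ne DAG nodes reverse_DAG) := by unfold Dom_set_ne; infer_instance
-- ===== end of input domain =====

-- B re-implements the default branch without building a reverse-graph index: it scans DAG directly
-- for in-neighbors (objective: alternative decomposition; equal return values, proved below).

-- ===== PORT A =====
-- reverse_graph: 'graph[node][neighbor]' is ported as getD (both keys are always present when Python runs this line, so getD is exact there)
def reverse_graph_port (graph : List (String × List (String × Int))) : PySem.Dict String (List (String × Int)) :=
  let d0 : PySem.Dict String (List (String × Int)) :=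
    graph.foldl (fun d p => d.insert p.1 ([] : List (String × Int))) (PySem.Dict.mk [])
  graph.foldl (fun d p =>
    ((PySem.Dict.mk p.2).keys).foldl (fun d v =>
      let d1 := if d.contains v then d else d.insert v []
      d1.insert v (((PySem.Dict.mk (d1.getD v [])).insert p.1
        ((PySem.Dict.mk ((PySem.Dict.mk graph).getD p.1 [])).getD v 0)).items)) d) d0

-- ne: 'DAG[node]' / 'reverse_DAG[node]' ported as getD (exact under Pre_set_ne, where the keys are present)
def ne_port (DAG : List (String × List (String × Int))) (node : String)
    (rev : PySem.Dict String (List (String × Int))) : List String :=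
  PySem.Set.union (PySem.Set.ofList (PySem.Dict.mk ((PySem.Dict.mk DAG).getD node [])).keys)
                  (PySem.Set.ofList (PySem.Dict.mk (rev.getD node [])).keys)

def set_ne (DAG : List (String × List (String × Int))) (nodes : List String) (reverse_DAG : Option (List (String × List (String × Int)))) : List String :=
  let stack := nodes
  let rev : PySem.Dict String (List (String × Int)) :=
    match reverse_DAG with
    | none => reverse_graph_port DAG
    | some rd => PySem.Dict.mk rd
  stack.foldl (fun s i => PySem.Set.union s (ne_port DAG i rev)) PySem.Set.empty

-- ===== PORT B =====
def set_ne_alt (DAG : List (String × List (String × Int))) (nodes : List String) (reverse_DAG : Option (List (String × List (String × Int)))) : List String :=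
  match reverse_DAG with
  | none =>
    nodes.foldl (fun s i =>
      let s := PySem.Set.update s ((PySem.Dict.mk ((PySem.Dict.mk DAG).getD i [])).keys)
      DAG.foldl (fun s p => if (PySem.Dict.mk p.2).contains i then PySem.Set.add s p.1 else s) s)
      PySem.Set.empty
  | some rd =>
    nodes.foldl (fun s i =>
      let s := PySem.Set.update s ((PySem.Dict.mk ((PySem.Dict.mk DAG).getD i [])).keys)
      PySem.Set.update s ((PySem.Dict.mk ((PySem.Dict.mk rd).getD i [])).keys)) PySem.Set.empty

-- ===== PRECONDITION & SPEC =====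
-- Pre_ = exactly the inputs where Python A returns: every requested node is a key of DAG
-- (and of reverse_DAG when one is supplied); otherwise A raises KeyError.
def Pre_set_ne (DAG : List (String × List (String × Int))) (nodes : List String) (reverse_DAG : Option (List (String × List (String × Int)))) : Prop :=
  match reverse_DAG with
  | none => ∀ i ∈ nodes, i ∈ DAG.map Prod.fst
  | some rd => ∀ i ∈ nodes, i ∈ DAG.map Prod.fst ∧ i ∈ rd.map Prod.fst
instance (DAG : List (String × List (String × Int))) (nodes : List String) (reverse_DAG : Option (List (String × List (String × Int)))) : Decidable (Pre_set_ne DAG nodes reverse_DAG) := by unfold Pre_set_ne; cases reverse_DAG <;> exact inferInstance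

def pvWitness_set_ne : (List (String × List (String × Int))) × List String × (Option (List (String × List (String × Int)))) :=
  ([("a", [("b", 1)]), ("b", [])], ["a", "b"], none)

def Spec_set_ne (DAG : List (String × List (String × Int))) (nodes : List String) (reverse_DAG : Option (List (String × List (String × Int)))) (out : List String) : Prop := out = set_ne_alt DAG nodes reverse_DAG
instance (DAG : List (String × List (String × Int))) (nodes : List String) (reverse_DAG : Option (List (String × List (String × Int)))) (out : List String) : Decidable (Spec_set_ne DAG nodes reverse_DAG out) := by unfold Spec_set_ne; infer_instance

-- ===== CLAIM (what is proved, stated in full; the proofs are below) =====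
def Claim_equal_set_ne : Prop := ∀ (DAG : List (String × List (String × Int))) (nodes : List String) (reverse_DAG : Option (List (String × List (String × Int)))), Dom_set_ne DAG nodes reverse_DAG → Pre_set_ne DAG nodes reverse_DAG → Spec_set_ne DAG nodes reverse_DAG (set_ne DAG nodes reverse_DAG)

-- ===== LEMMAS AND PROOFS =====

theorem pv_union_update (s t : List String) :
    PySem.Set.union s t = PySem.Set.update s t := rfl

-- updating with a deduplicated list is updating with the list itself
theorem pv_update_ofList (s L : List String) :
    PySem.Set.update s (PySem.Set.ofList L) = PySem.Set.update s L := by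
  rw [PySem.Set.update_eq_append_filter, PySem.Set.update_eq_append_filter, PySem.Set.ofList_ofList]

theorem pv_update_add (s t : List String) (x : String) :
    PySem.Set.update s (PySem.Set.add t x) = PySem.Set.add (PySem.Set.update s t) x := by
  by_cases h : x ∈ t
  · rw [PySem.Set.add_of_mem h, PySem.Set.add_of_mem ((PySem.Set.mem_update s t x).2 (Or.inr h))]
  · rw [PySem.Set.add_of_not_mem h, PySem.Set.update_append]
    rfl

-- update distributes over a nested update (set union is associative at the list level)
theorem pv_update_update (r : List String) : ∀ (s t : List String),
    PySem.Set.update s (PySem.Set.update t r) = PySem.Set.update (PySem.Set.update s t) r := by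
  induction r with
  | nil => intro s t; rfl
  | cons x r ih =>
    intro s t
    rw [PySem.Set.update_cons, PySem.Set.update_cons, ih, pv_update_add]

-- the add-if-condition loop is a Set.update with the filtered projection
theorem pv_foldl_if (i : String) (l : List (String × List (String × Int))) : ∀ (s : List String),
    l.foldl (fun s p => if (PySem.Dict.mk p.2).contains i then PySem.Set.add s p.1 else s) s
      = PySem.Set.update s ((l.filter (fun p => (PySem.Dict.mk p.2).contains i)).map Prod.fst) := by
  induction l with
  | nil => intro s; rfl
  | cons p l ih =>
    intro s
    by_cases h : (PySem.Dict.mk p.2).contains i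
    · simp only [List.foldl_cons, List.filter_cons, h, if_pos, List.map_cons, ih,
        PySem.Set.update_cons]
    · simp only [List.foldl_cons, List.filter_cons, h, if_false, Bool.false_eq_true, ih]

-- keys of an insert into a (raw-list) dict value
theorem pv_keys_insert (m : List (String × Int)) (u : String) (w : Int) :
    (((PySem.Dict.mk m).insert u w).items).map Prod.fst = PySem.Set.add (m.map Prod.fst) u := by
  by_cases h : (PySem.Dict.mk m).contains u
  · rw [PySem.Dict.items_insert_of_contains _ _ h]
    have hm : u ∈ m.map Prod.fst :=
      (PySem.Dict.contains_iff_mem_keys (PySem.Dict.mk m) u).1 h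
    rw [PySem.Set.add_of_mem hm]
    show (List.map (fun p => if (p.1 == u) = true then (u, w) else p) m).map Prod.fst
        = m.map Prod.fst
    rw [List.map_map]
    refine List.map_congr_left (fun p _ => ?_)
    by_cases hp : p.1 = u
    · simp [hp]
    · simp [hp]
  · have hf : (PySem.Dict.mk m).contains u = false := by
      cases hc : (PySem.Dict.mk m).contains u
      · rfl
      · exact absurd hc h
    have hm : u ∉ m.map Prod.fst := fun hu =>
      h ((PySem.Dict.contains_iff_mem_keys (PySem.Dict.mk m) u).2 hu)
    rw [PySem.Dict.items_insert_of_not_contains _ _ hf, PySem.Set.add_of_not_mem hm]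
    simp

-- the two-step 'ensure key then assign' of reverse_graph is a single insert
theorem pv_revstep (d : PySem.Dict String (List (String × Int))) (v u : String) (w : Int) :
    (let d1 := if d.contains v then d else d.insert v []
     d1.insert v (((PySem.Dict.mk (d1.getD v [])).insert u w).items))
    = d.insert v (((PySem.Dict.mk (d.getD v [])).insert u w).items) := by
  by_cases h : d.contains v
  · simp [h]
  · have hf : d.contains v = false := by simpa using h
    simp only [h, if_false, Bool.false_eq_true, PySem.Dict.getD_insert_self,
      PySem.Dict.insert_insert_self, PySem.Dict.getD_of_not_contains _ _ hf]

-- effect of the inner neighbor loop of reverse_graph on one entry's key list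
theorem pv_inner (i u : String) (w : String → Int) (ks : List String) : ∀ (d : PySem.Dict String (List (String × Int))),
    (((ks.foldl (fun d v =>
        let d1 := if d.contains v then d else d.insert v []
        d1.insert v (((PySem.Dict.mk (d1.getD v [])).insert u (w v)).items)) d).getD i []).map Prod.fst)
    = if i ∈ ks then PySem.Set.add ((d.getD i []).map Prod.fst) u else (d.getD i []).map Prod.fst := by
  induction ks with
  | nil => intro d; simp
  | cons v ks ih =>
    intro d
    rw [List.foldl_cons, pv_revstep, ih]
    by_cases hv : i = v
    · subst hv
      rw [PySem.Dict.getD_insert_self, pv_keys_insert]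
      by_cases hk : i ∈ ks
      · rw [if_pos hk, if_pos (by simp),
          PySem.Set.add_of_mem ((PySem.Set.mem_add _ _ _).2 (Or.inr rfl))]
      · rw [if_neg hk, if_pos (by simp)]
    · rw [PySem.Dict.getD_insert_of_ne _ _ _ hv]
      by_cases hk : i ∈ ks
      · rw [if_pos hk, if_pos (by simp [hk])]
      · rw [if_neg hk, if_neg (by simp [hv, hk])]

-- effect of the full reverse_graph edge loop on one entry's key list
theorem pv_outer (i : String) (graph l : List (String × List (String × Int))) : ∀ (d : PySem.Dict String (List (String × Int))),
    (((l.foldl (fun d p =>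
        ((PySem.Dict.mk p.2).keys).foldl (fun d v =>
          let d1 := if d.contains v then d else d.insert v []
          d1.insert v (((PySem.Dict.mk (d1.getD v [])).insert p.1
            ((PySem.Dict.mk ((PySem.Dict.mk graph).getD p.1 [])).getD v 0)).items)) d) d).getD i []).map Prod.fst)
    = l.foldl (fun ks p => if (PySem.Dict.mk p.2).contains i then PySem.Set.add ks p.1 else ks)
        ((d.getD i []).map Prod.fst) := by
  induction l with
  | nil => intro d; rfl
  | cons p l ih =>
    intro d
    rw [List.foldl_cons, List.foldl_cons, ih,
        pv_inner i p.1 (fun v => (PySem.Dict.mk ((PySem.Dict.mk graph).getD p.1 [])).getD v 0) _ d]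
    by_cases h : i ∈ (PySem.Dict.mk p.2).keys
    · rw [if_pos h, if_pos ((PySem.Dict.contains_iff_mem_keys _ _).2 h)]
    · rw [if_neg h, if_neg (fun hc => h ((PySem.Dict.contains_iff_mem_keys _ _).1 hc))]

-- the all-keys initialization stores only empty dicts
theorem pv_init (i : String) (l : List (String × List (String × Int))) :
    ∀ (d : PySem.Dict String (List (String × Int))), d.getD i [] = [] →
    ((l.foldl (fun d p => d.insert p.1 ([] : List (String × Int))) d).getD i []) = [] := by
  induction l with
  | nil => intro d h; exact h
  | cons p l ih =>
    intro d h
    rw [List.foldl_cons]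
    refine ih _ ?_
    by_cases hp : i = p.1
    · subst hp; exact PySem.Dict.getD_insert_self _ _ _ _
    · rw [PySem.Dict.getD_insert_of_ne _ _ _ hp]; exact h

-- the key list of entry i of reverse_graph_port
theorem pv_rev_keys (i : String) (DAG : List (String × List (String × Int))) :
    (((reverse_graph_port DAG).getD i []).map Prod.fst)
    = DAG.foldl (fun ks p => if (PySem.Dict.mk p.2).contains i then PySem.Set.add ks p.1 else ks) [] := by
  unfold reverse_graph_port
  rw [pv_outer, pv_init i DAG _ (by rfl)]
  rfl

-- per-node step equality, default branch
theorem pv_step_none (DAG : List (String × List (String × Int))) (i : String) (s : List String) :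
    PySem.Set.union s (ne_port DAG i (reverse_graph_port DAG))
    = DAG.foldl (fun s p => if (PySem.Dict.mk p.2).contains i then PySem.Set.add s p.1 else s)
        (PySem.Set.update s ((PySem.Dict.mk ((PySem.Dict.mk DAG).getD i [])).keys)) := by
  rw [pv_foldl_if]
  unfold ne_port
  have hkeys : (PySem.Dict.mk ((reverse_graph_port DAG).getD i [])).keys
      = ((reverse_graph_port DAG).getD i []).map Prod.fst := rfl
  rw [pv_union_update, pv_union_update, hkeys, pv_rev_keys, pv_foldl_if i DAG [],
    PySem.Set.update_nil_left, PySem.Set.ofList_ofList, pv_update_update,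
    pv_update_ofList, pv_update_ofList]

-- per-node step equality, supplied-reverse branch
theorem pv_step_some (DAG rd : List (String × List (String × Int))) (i : String) (s : List String) :
    PySem.Set.union s (ne_port DAG i (PySem.Dict.mk rd))
    = PySem.Set.update
        (PySem.Set.update s ((PySem.Dict.mk ((PySem.Dict.mk DAG).getD i [])).keys))
        ((PySem.Dict.mk ((PySem.Dict.mk rd).getD i [])).keys) := by
  unfold ne_port
  rw [pv_union_update, pv_union_update, pv_update_update, pv_update_ofList, pv_update_ofList]

-- whole-fold equality, default branch
theorem pv_fold_none (DAG : List (String × List (String × Int))) (nodes : List String) : ∀ (s : List String),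
    nodes.foldl (fun s i => PySem.Set.union s (ne_port DAG i (reverse_graph_port DAG))) s
    = nodes.foldl (fun s i =>
        let s := PySem.Set.update s ((PySem.Dict.mk ((PySem.Dict.mk DAG).getD i [])).keys)
        DAG.foldl (fun s p => if (PySem.Dict.mk p.2).contains i then PySem.Set.add s p.1 else s) s) s := by
  induction nodes with
  | nil => intro s; rfl
  | cons i nodes ih => intro s; rw [List.foldl_cons, List.foldl_cons, pv_step_none]; exact ih _

-- whole-fold equality, supplied-reverse branch
theorem pv_fold_some (DAG rd : List (String × List (String × Int))) (nodes : List String) : ∀ (s : List String),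
    nodes.foldl (fun s i => PySem.Set.union s (ne_port DAG i (PySem.Dict.mk rd))) s
    = nodes.foldl (fun s i =>
        let s := PySem.Set.update s ((PySem.Dict.mk ((PySem.Dict.mk DAG).getD i [])).keys)
        PySem.Set.update s ((PySem.Dict.mk ((PySem.Dict.mk rd).getD i [])).keys)) s := by
  induction nodes with
  | nil => intro s; rfl
  | cons i nodes ih => intro s; rw [List.foldl_cons, List.foldl_cons, pv_step_some]; exact ih _

-- ===== VERDICT (by name: the statement is the Claim_ definition above) =====
theorem set_ne_spec : Claim_equal_set_ne := by
  intro DAG nodes reverse_DAG _ _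
  show set_ne DAG nodes reverse_DAG = set_ne_alt DAG nodes reverse_DAG
  cases reverse_DAG with
  | none => exact pv_fold_none DAG nodes PySem.Set.empty
  | some rd => exact pv_fold_some DAG rd nodes PySem.Set.empty
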